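-- pv_equiv track=rewrite | github.com/riyanhax/Control_Venta_Jugos | Talleres de 3er Fundamentos/Sant_Ejerc-6.py | clienmax
-- ===== SOURCE A (Python) =====
-- def clienmax(d,n):
--     max = d[0][3]
--     for j in range(n):
--         if d[j][3] > max:
--             max = d[j][3]
--             quien = d[j][1]
--         elif d[j][3] == max:
--             max = d[j][3]
--             quien = d[j][1]
--     return max,quien
-- ===== SOURCE B (Python) =====
-- def clienmax(d, n):
--     prefix = d[:n]
--     M = max(x[3] for x in prefix)
--     for x in reversed(prefix):
--         if x[3] == M:
--             return M, x[1]
-- ===== Notes on version B (the rewrite author's own statement) =====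
-- stated objective: simpler
-- what changed: Replaces A's single fused running-max-with-client loop by two passes: the max of the first n fields via the max builtin on a slice, then a reverse scan returning the client of the last record attaining it.
import Mathlib
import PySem

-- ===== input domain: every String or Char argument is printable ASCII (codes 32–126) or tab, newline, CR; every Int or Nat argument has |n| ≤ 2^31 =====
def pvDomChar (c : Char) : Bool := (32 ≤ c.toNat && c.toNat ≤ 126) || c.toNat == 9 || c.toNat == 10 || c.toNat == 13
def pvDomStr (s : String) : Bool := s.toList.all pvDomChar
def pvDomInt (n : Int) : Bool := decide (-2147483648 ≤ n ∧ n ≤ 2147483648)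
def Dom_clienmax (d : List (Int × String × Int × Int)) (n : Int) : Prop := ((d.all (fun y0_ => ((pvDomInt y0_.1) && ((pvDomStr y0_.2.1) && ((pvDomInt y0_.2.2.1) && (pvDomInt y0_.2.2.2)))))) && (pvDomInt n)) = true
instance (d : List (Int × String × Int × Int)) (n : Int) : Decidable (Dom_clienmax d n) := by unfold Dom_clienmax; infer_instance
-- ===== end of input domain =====

-- B is a simpler two-pass version (max of the first n fields, then reverse scan for its
-- last attaining client); equal to A wherever A returns (Pre_: 1 ≤ n ≤ len d).

-- ===== PORT A =====
-- Single loop over j in range(n), running max initialised to d[0][3]; quien starts unbound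
-- (Option String, none = UnboundLocalError), updated on '>' and on '=='. Indexing via pyGetD
-- is exact under Pre_; the final .getD "" is only reached outside Pre_.
def clienmax (d : List (Int × String × Int × Int)) (n : Int) : Int × String :=
  let m0 : Int := (PySem.List.pyGetD d 0 (0, "", 0, 0)).2.2.2
  let st := (PySem.List.pyRange 0 n 1).foldl
    (fun (s : Int × Option String) j =>
      let p := PySem.List.pyGetD d j (0, "", 0, 0)
      if p.2.2.2 > s.1 then (p.2.2.2, some p.2.1)
      else if p.2.2.2 = s.1 then (p.2.2.2, some p.2.1)
      else s)
    (m0, none)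
  (st.1, st.2.getD "")

-- ===== PORT B =====
-- Two passes over the slice d[:n]: max of the fields, then first match in the reversed slice.
-- The none branch is only reached on an empty slice (outside Pre_, where Python's max raises).
def clienmax_alt (d : List (Int × String × Int × Int)) (n : Int) : Int × String :=
  let pre := PySem.List.slice d none (some n)
  let M : Int := (PySem.List.max? (pre.map (fun p => p.2.2.2)) (fun x => x)).getD 0
  match pre.reverse.find? (fun p => p.2.2.2 = M) with
  | some p => (M, p.2.1)
  | none => (M, "")

-- ===== PRECONDITION & SPEC =====
-- Exactly the inputs on which A returns: n ≥ 1 (else quien is unbound / d[0] raises) and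
-- n ≤ len d (else d[j] raises IndexError).
def Pre_clienmax (d : List (Int × String × Int × Int)) (n : Int) : Prop :=
  1 ≤ n ∧ n ≤ d.length
instance (d : List (Int × String × Int × Int)) (n : Int) : Decidable (Pre_clienmax d n) := by unfold Pre_clienmax; infer_instance
def pvWitness_clienmax : (List (Int × String × Int × Int)) × Int :=
  ([(1, "ana", 0, 5), (2, "bob", 0, 7), (3, "cyd", 0, 7)], 3)

def Spec_clienmax (d : List (Int × String × Int × Int)) (n : Int) (out : Int × String) : Prop := out = clienmax_alt d n
instance (d : List (Int × String × Int × Int)) (n : Int) (out : Int × String) : Decidable (Spec_clienmax d n out) := by unfold Spec_clienmax; infer_instance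

-- ===== CLAIM (what is proved, stated in full; the proofs are below) =====
def Claim_equal_clienmax : Prop := ∀ (d : List (Int × String × Int × Int)) (n : Int), Dom_clienmax d n → Pre_clienmax d n → Spec_clienmax d n (clienmax d n)

-- ===== LEMMAS AND PROOFS =====

-- the body of A's fused loop, named for the proofs
def pvStep (s : Int × Option String) (p : Int × String × Int × Int) : Int × Option String :=
  if p.2.2.2 > s.1 then (p.2.2.2, some p.2.1)
  else if p.2.2.2 = s.1 then (p.2.2.2, some p.2.1)
  else s

-- invariant of A's fused loop, by induction from the right: first component is the running
-- max, second is the client of the last element attaining it (or the initial q if none does)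
theorem pvLoop_inv (l : List (Int × String × Int × Int)) (m : Int) (q : Option String) :
    l.foldl pvStep (m, q) =
      (l.foldl (fun acc p => max acc p.2.2.2) m,
       match l.reverse.find? (fun p => p.2.2.2 = (l.foldl (fun acc p => max acc p.2.2.2) m)) with
       | some p => some p.2.1
       | none => q) := by
  induction l using List.reverseRecOn with
  | nil => simp
  | append_singleton l' e ih =>
    rw [List.foldl_append, List.foldl_cons, List.foldl_nil, ih,
        List.foldl_append, List.foldl_cons, List.foldl_nil]
    have hrev : (l' ++ [e]).reverse = e :: l'.reverse := by simp
    rw [hrev, List.find?_cons]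
    generalize l'.foldl (fun acc p => max acc p.2.2.2) m = M1
    rcases lt_trichotomy M1 e.2.2.2 with h | h | h
    · have hm : max M1 e.2.2.2 = e.2.2.2 := by omega
      rw [hm]
      unfold pvStep
      rw [if_pos (show e.2.2.2 > M1 from h)]
      simp
    · have hm : max M1 e.2.2.2 = e.2.2.2 := by omega
      rw [hm]
      unfold pvStep
      rw [if_neg (by omega), if_pos h.symm]
      simp
    · have hm : max M1 e.2.2.2 = M1 := by omega
      rw [hm]
      unfold pvStep
      rw [if_neg (by omega), if_neg (by omega)]
      have hd : (decide (e.2.2.2 = M1)) = false := by simp; omega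
      rw [hd]

theorem clienmax_spec0 (d : List (Int × String × Int × Int)) (n : Int)
    (h1 : 1 ≤ n) (h2 : n ≤ d.length) : clienmax d n = clienmax_alt d n := by
  set k := n.toNat with hk
  have hn : n = (k : Int) := by omega
  have hk1 : 1 ≤ k := by omega
  have hkd : k ≤ d.length := by omega
  set pre := d.take k with hpre
  have hlen : pre.length = k := by simp [hpre]; omega
  have hslice : PySem.List.slice d none (some n) = pre := by
    rw [hn, PySem.List.slice_to_natCast d k]
  obtain ⟨x0, t, hxt⟩ : ∃ x0 t, pre = x0 :: t := by
    cases hp : pre with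
    | nil => exfalso; rw [hp] at hlen; simp at hlen; omega
    | cons a b => exact ⟨a, b, rfl⟩
  -- A's index loop over range(n) is the list fold of pvStep over the prefix
  have hgetd : ∀ j : Int, j ∈ PySem.List.pyRange 0 n 1 →
      PySem.List.pyGetD d j (0, "", 0, 0) = PySem.List.pyGetD pre j (0, "", 0, 0) := by
    intro j hj
    rw [PySem.List.mem_pyRange_one] at hj
    have hj0 : j = ((j.toNat : Nat) : Int) := by omega
    rw [hj0, PySem.List.pyGetD_natCast, PySem.List.pyGetD_natCast, hpre]
    rw [List.getD, List.getD, List.getElem?_take_of_lt (by omega)]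
  have h0 : (PySem.List.pyGetD d 0 (0, "", 0, 0)).2.2.2 = x0.2.2.2 := by
    have h00 : PySem.List.pyGetD d (0:Int) (0, "", 0, 0)
        = PySem.List.pyGetD pre (0:Int) (0, "", 0, 0) := by
      rw [show ((0:Int)) = ((0:Nat):Int) by rfl, PySem.List.pyGetD_natCast,
          PySem.List.pyGetD_natCast, hpre]
      rw [List.getD, List.getD, List.getElem?_take_of_lt (by omega)]
    rw [h00, hxt, PySem.List.pyGetD_zero_cons]
  have hA : (PySem.List.pyRange 0 n 1).foldl
      (fun (s : Int × Option String) j =>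
        let p := PySem.List.pyGetD d j (0, "", 0, 0)
        if p.2.2.2 > s.1 then (p.2.2.2, some p.2.1)
        else if p.2.2.2 = s.1 then (p.2.2.2, some p.2.1)
        else s) ((PySem.List.pyGetD d 0 (0, "", 0, 0)).2.2.2, none)
      = pre.foldl pvStep (x0.2.2.2, none) := by
    rw [h0]
    have hcong := PySem.List.foldl_congr_mem (PySem.List.pyRange 0 n 1)
      (fun (s : Int × Option String) j => pvStep s (PySem.List.pyGetD d j (0, "", 0, 0)))
      (fun (s : Int × Option String) j => pvStep s (PySem.List.pyGetD pre j (0, "", 0, 0)))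
      ((x0.2.2.2 : Int), (none : Option String))
      (by intro acc x hx
          show pvStep acc (PySem.List.pyGetD d x (0, "", 0, 0))
              = pvStep acc (PySem.List.pyGetD pre x (0, "", 0, 0))
          rw [hgetd x hx])
    rw [show (fun (s : Int × Option String) j =>
        let p := PySem.List.pyGetD d j (0, "", 0, 0)
        if p.2.2.2 > s.1 then (p.2.2.2, some p.2.1)
        else if p.2.2.2 = s.1 then (p.2.2.2, some p.2.1)
        else s) = fun (s : Int × Option String) j =>
          pvStep s (PySem.List.pyGetD d j (0, "", 0, 0)) from rfl]
    rw [hcong, show n = (pre.length : Int) by rw [hlen]; omega]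
    exact PySem.List.foldl_pyRange_zero_pyGetD' pre (0, "", 0, 0) pvStep (x0.2.2.2, none)
  -- B's max over the prefix fields is A's running max
  have hMeq : (PySem.List.max? ((x0 :: t).map (fun p => p.2.2.2)) (fun x => x)).getD 0
      = (x0 :: t).foldl (fun acc p => max acc p.2.2.2) x0.2.2.2 := by
    rw [List.map_cons, PySem.List.max?_id_cons, Option.getD_some, List.foldl_map,
        List.foldl_cons, max_self]
  simp only [clienmax, clienmax_alt, hslice, hA, hxt]
  rw [pvLoop_inv, hMeq]
  cases hf : (x0 :: t).reverse.find?
      (fun p => p.2.2.2 = (x0 :: t).foldl (fun acc p => max acc p.2.2.2) x0.2.2.2) with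
  | none => simp
  | some p => simp

-- ===== VERDICT (by name: the statement is the Claim_ definition above) =====
theorem clienmax_spec : Claim_equal_clienmax := by
  intro d n _ hpre
  unfold Spec_clienmax
  exact clienmax_spec0 d n hpre.1 hpre.2
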